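-- pv_equiv track=rewrite | github.com/PeterReisNyman/PlayGround | ai.py | label_third
-- ===== SOURCE A (Python) =====
-- from typing import List, Tuple, Dict
--
-- THIRDS = [0, 20, 40, 60]
--
-- def label_third(num: int) -> List[int]:
--     """Return a one-hot label indicating which third the number belongs to."""
--     result = []
--     for third in THIRDS[:-1]:
--         if third <= num < third + 20:
--             result.append(1)
--         else:
--             result.append(0)
--     return result
-- ===== SOURCE B (Python) =====
-- def label_third(num: int):
--     idx = num // 20
--     result = [0, 0, 0]
--     if 0 <= idx < 3:
--         result[idx] = 1
--     return result
-- ===== Notes on version B (the rewrite author's own statement) =====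
-- stated objective: simpler
-- what changed: Replaces the scan over the boundary list with a closed-form slot index num // 20 and a single one-hot assignment into [0,0,0].
import Mathlib
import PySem

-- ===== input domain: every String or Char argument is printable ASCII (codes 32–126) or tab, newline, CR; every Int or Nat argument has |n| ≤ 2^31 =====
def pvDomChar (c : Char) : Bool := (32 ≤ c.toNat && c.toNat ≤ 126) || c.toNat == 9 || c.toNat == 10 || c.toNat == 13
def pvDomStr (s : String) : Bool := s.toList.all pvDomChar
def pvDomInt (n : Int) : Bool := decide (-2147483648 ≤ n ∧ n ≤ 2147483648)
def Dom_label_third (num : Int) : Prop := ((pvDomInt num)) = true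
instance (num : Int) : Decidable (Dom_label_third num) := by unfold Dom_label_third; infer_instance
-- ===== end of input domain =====

-- B replaces A's scan over the boundary list by the closed-form slot index num // 20 (simpler).


-- ===== PORT A =====
def THIRDS : List Int := [0, 20, 40, 60]

def label_third (num : Int) : List Int :=
  (PySem.List.slice THIRDS none (some (-1))).foldl
    (fun result third =>
      if third ≤ num ∧ num < third + 20 then result ++ [1] else result ++ [0]) []

-- ===== PORT B =====
def label_third_alt (num : Int) : List Int :=
  let idx := PySem.Int.floordiv num 20
  let result : List Int := [0, 0, 0]
  if 0 ≤ idx ∧ idx < 3 then result.set idx.toNat 1 else result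

-- ===== PRECONDITION & SPEC =====
def Spec_label_third (num : Int) (out : List Int) : Prop := out = label_third_alt num
instance (num : Int) (out : List Int) : Decidable (Spec_label_third num out) := by unfold Spec_label_third; infer_instance

-- ===== CLAIM (what is proved, stated in full; the proofs are below) =====
def Claim_equal_label_third : Prop := ∀ (num : Int), Dom_label_third num → Spec_label_third num (label_third num)

-- ===== LEMMAS AND PROOFS =====

-- ===== VERDICT (by name: the statement is the Claim_ definition above) =====
theorem label_third_spec : Claim_equal_label_third := by
  intro num _
  unfold Spec_label_third label_third label_third_alt THIRDS
  have hq := PySem.Int.floordiv_eq_ediv_of_pos (a := num) (b := 20) (by norm_num)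
  simp only [PySem.List.slice, hq]
  by_cases h0 : 0 ≤ num ∧ num < 20
  · have h : num / 20 = 0 := by omega
    simp [h, h0.1, h0.2]
    split_ifs <;> first | rfl | omega
  · by_cases h1 : 20 ≤ num ∧ num < 40
    · have h : num / 20 = 1 := by omega
      simp [h, h1.1, h1.2]
      split_ifs <;> first | rfl | omega
    · by_cases h2 : 40 ≤ num ∧ num < 60
      · have h : num / 20 = 2 := by omega
        simp [h, h2.1, h2.2]
        split_ifs <;> first | rfl | omega
      · have h : ¬ (0 ≤ num / 20 ∧ num / 20 < 3) := by omega
        simp [h]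
        split_ifs <;> first | rfl | omega
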